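-- pv_equiv track=rewrite | github.com/nicksona26/Python | LABS/Lab_09/lab9.py | dupKey
-- ===== SOURCE A (Python) =====
-- def dupKey(adict):
--     vals = adict.values()
--     prevElements = []
--     count = 0
--     for element in vals:
--         prevElements.append(element)
--     set1 = set(prevElements)
--     len1 = len(prevElements)
--     len2 = len(set1)
--     if len1 != len2:
--         return False
--     else:
--         return True
-- ===== SOURCE B (Python) =====
-- def dupKey(adict):
--     seen = set()
--     for v in adict.values():
--         if v in seen:
--             return False
--         seen.add(v)
--     return True
-- ===== Notes on version B (the rewrite author's own statement) =====
-- stated objective: simpler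
-- what changed: B makes a single early-exit pass over the values with a 'seen' set instead of copying all values into a list, building a full set and comparing the two lengths.
import Mathlib
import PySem

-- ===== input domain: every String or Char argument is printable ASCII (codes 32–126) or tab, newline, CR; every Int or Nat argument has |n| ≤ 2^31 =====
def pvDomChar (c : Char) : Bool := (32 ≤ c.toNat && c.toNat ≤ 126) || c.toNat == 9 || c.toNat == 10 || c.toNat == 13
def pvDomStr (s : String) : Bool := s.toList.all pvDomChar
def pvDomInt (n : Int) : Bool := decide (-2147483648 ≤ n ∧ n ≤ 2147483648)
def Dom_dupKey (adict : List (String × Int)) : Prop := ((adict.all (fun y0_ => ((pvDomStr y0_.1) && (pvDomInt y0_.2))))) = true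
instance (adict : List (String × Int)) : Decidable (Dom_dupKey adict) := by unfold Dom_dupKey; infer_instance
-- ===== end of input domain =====

-- B: one early-exit pass over the values with a 'seen' set, instead of A's copy-all-values, build-a-set and compare-lengths; return value only.
-- ===== PORT A =====
def dupKey (adict : List (String × Int)) : Bool :=
  let vals := (PySem.Dict.ofList adict).values
  let prevElements := vals.foldl (fun acc element => acc ++ [element]) []
  let set1 := PySem.Set.ofList prevElements
  let len1 : Int := prevElements.length
  let len2 := PySem.Set.len set1
  if len1 ≠ len2 then false else true

-- ===== PORT B =====
def dupKeyLoop (vals : List Int) (seen : PySem.Set Int) : Bool :=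
  match vals with
  | [] => true
  | v :: rest =>
    if PySem.Set.contains seen v then false
    else dupKeyLoop rest (PySem.Set.add seen v)

def dupKey_alt (adict : List (String × Int)) : Bool :=
  dupKeyLoop (PySem.Dict.ofList adict).values PySem.Set.empty

-- ===== PRECONDITION & SPEC =====
def Spec_dupKey (adict : List (String × Int)) (out : Bool) : Prop := out = dupKey_alt adict
instance (adict : List (String × Int)) (out : Bool) : Decidable (Spec_dupKey adict out) := by unfold Spec_dupKey; infer_instance

-- ===== CLAIM (what is proved, stated in full; the proofs are below) =====
def Claim_equal_dupKey : Prop := ∀ (adict : List (String × Int)), Dom_dupKey adict → Spec_dupKey adict (dupKey adict)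

-- ===== LEMMAS AND PROOFS =====
lemma loop_iff (vals seen : List Int) :
    dupKeyLoop vals seen = true ↔ vals.Nodup ∧ ∀ v ∈ vals, v ∉ seen := by
  induction vals generalizing seen with
  | nil => simp [dupKeyLoop]
  | cons v rest ih =>
    by_cases hv : PySem.Set.contains seen v = true
    · have hvmem : v ∈ seen := by simpa [PySem.Set.contains] using hv
      simp only [dupKeyLoop]
      rw [if_pos hv]
      simp only [Bool.false_eq_true, false_iff]
      rintro ⟨_, hall⟩
      exact hall v List.mem_cons_self hvmem
    · have hvmem : v ∉ seen := by simpa [PySem.Set.contains] using hv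
      simp only [dupKeyLoop]
      rw [if_neg hv, ih]
      simp only [PySem.Set.mem_add, List.nodup_cons, List.mem_cons]
      constructor
      · rintro ⟨hnd, hall⟩
        refine ⟨⟨fun hvr => (hall v hvr) (Or.inr rfl), hnd⟩, ?_⟩
        rintro u (rfl | hu)
        · exact hvmem
        · exact fun hus => (hall u hu) (Or.inl hus)
      · rintro ⟨⟨hvr, hnd⟩, hall⟩
        refine ⟨hnd, fun u hu hmem => ?_⟩
        cases hmem with
        | inl hus => exact (hall u (Or.inr hu)) hus
        | inr huv => exact hvr (huv ▸ hu)

lemma foldl_add_split (vals : List Int) : ∀ (s : List Int),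
    ∃ t, vals.foldl PySem.Set.add s = s ++ t ∧ t.Sublist vals := by
  induction vals with
  | nil => intro s; exact ⟨[], by simp, by simp⟩
  | cons v rest ih =>
    intro s
    by_cases hv : v ∈ s
    · obtain ⟨t, ht, hs⟩ := ih s
      refine ⟨t, ?_, hs.trans (List.sublist_cons_self v rest)⟩
      simpa [List.foldl_cons, PySem.Set.add, hv] using ht
    · obtain ⟨t, ht, hs⟩ := ih (s ++ [v])
      refine ⟨v :: t, ?_, hs.cons₂ v⟩
      simpa [List.foldl_cons, PySem.Set.add, hv, List.append_assoc] using ht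

lemma foldl_add_of_nodup (vals : List Int) : ∀ (s : List Int),
    vals.Nodup → (∀ v ∈ vals, v ∉ s) → vals.foldl PySem.Set.add s = s ++ vals := by
  induction vals with
  | nil => intro s _ _; simp
  | cons v rest ih =>
    intro s hnd hall
    have hvm : v ∉ s := hall v List.mem_cons_self
    have hrest := ih (s ++ [v]) hnd.of_cons (by
      intro u hu
      simp only [List.mem_append, List.mem_singleton]
      rintro (hus | rfl)
      · exact (hall u (List.mem_cons_of_mem _ hu)) hus
      · exact (List.nodup_cons.mp hnd).1 hu)
    simpa [List.foldl_cons, PySem.Set.add, hvm] using hrest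

lemma len_ofList_iff (vals : List Int) :
    ((vals.length : Int) = PySem.Set.len (PySem.Set.ofList vals)) ↔ vals.Nodup := by
  simp only [PySem.Set.len, Int.natCast_inj]
  constructor
  · intro h
    obtain ⟨t, ht, hs⟩ := foldl_add_split vals []
    have hlen : t.length = vals.length := by
      have : (PySem.Set.ofList vals).length = t.length := by
        simp [PySem.Set.ofList, PySem.Set.empty, ht]
      omega
    have ht' : t = vals := hs.eq_of_length hlen
    have hofl : PySem.Set.ofList vals = vals := by
      simpa [PySem.Set.ofList, PySem.Set.empty, ht'] using ht
    have := PySem.Set.nodup_ofList vals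
    rwa [hofl] at this
  · intro h
    have := foldl_add_of_nodup vals [] h (by simp)
    simp [PySem.Set.ofList, PySem.Set.empty, this]

-- ===== VERDICT (by name: the statement is the Claim_ definition above) =====
theorem dupKey_spec : Claim_equal_dupKey := by
  intro adict _
  unfold Spec_dupKey
  show dupKey adict = dupKey_alt adict
  simp only [dupKey, dupKey_alt, PySem.List.foldl_append_singleton, List.nil_append]
  by_cases h : ((PySem.Dict.ofList adict).values).Nodup
  · have hlen : (PySem.Dict.ofList adict).values.length
        = (PySem.Set.ofList (PySem.Dict.ofList adict).values).length := by
      have := (len_ofList_iff (PySem.Dict.ofList adict).values).mpr h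
      simpa [PySem.Set.len, Int.natCast_inj] using this
    have hloop : dupKeyLoop (PySem.Dict.ofList adict).values [] = true :=
      (loop_iff _ _).mpr ⟨h, by simp⟩
    simp [PySem.Set.empty, hlen, hloop]
  · have hlen : (PySem.Dict.ofList adict).values.length
        ≠ (PySem.Set.ofList (PySem.Dict.ofList adict).values).length := by
      intro hc
      exact h ((len_ofList_iff _).mp (by simp [PySem.Set.len, hc]))
    have hloop : dupKeyLoop (PySem.Dict.ofList adict).values [] = false := by
      by_cases hb : dupKeyLoop (PySem.Dict.ofList adict).values [] = true
      · exact absurd ((loop_iff _ _).mp hb).1 h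
      · simpa using hb
    simp [PySem.Set.empty, hlen, hloop]
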